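-- pv_equiv track=rewrite | github.com/CarlDog/openchronicle-mcp | plugins/storytelling/parsers.py | _strip_file_header
-- ===== SOURCE A (Python) =====
-- def _strip_file_header(text: str) -> str:
--     """Remove common file-level headers like [CORE FILE – DO NOT MODIFY...]."""
--     # Strip leading lines that are file-level metadata
--     lines = text.strip().split("\n")
--     cleaned: list[str] = []
--     skipping_header = True
--     for line in lines:
--         stripped = line.strip()
--         if skipping_header:
--             if stripped.startswith("[CORE FILE") or stripped == "":
--                 continue
--             skipping_header = False
--         cleaned.append(line)
--     return "\n".join(cleaned)
-- ===== SOURCE B (Python) =====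
-- def _strip_file_header(text: str) -> str:
--     """Remove common file-level headers like [CORE FILE - DO NOT MODIFY...]."""
--     # Work on the stripped string itself: peel one header line at a time with
--     # str.partition -- never builds a list of lines and never joins; the result
--     # is a suffix of the stripped text.
--     t = text.strip()
--     while True:
--         head, sep, rest = t.partition("\n")
--         s = head.strip()
--         if s != "" and not s.startswith("[CORE FILE"):
--             return t
--         if not sep:
--             return ""
--         t = rest
-- ===== Notes on version B (the rewrite author's own statement) =====
-- stated objective: alternative
-- what changed: B never splits the text into a list of lines nor joins one back: it peels leading header lines off the stripped string itself with str.partition and returns the remaining suffix of the string directly.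
import Mathlib
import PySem

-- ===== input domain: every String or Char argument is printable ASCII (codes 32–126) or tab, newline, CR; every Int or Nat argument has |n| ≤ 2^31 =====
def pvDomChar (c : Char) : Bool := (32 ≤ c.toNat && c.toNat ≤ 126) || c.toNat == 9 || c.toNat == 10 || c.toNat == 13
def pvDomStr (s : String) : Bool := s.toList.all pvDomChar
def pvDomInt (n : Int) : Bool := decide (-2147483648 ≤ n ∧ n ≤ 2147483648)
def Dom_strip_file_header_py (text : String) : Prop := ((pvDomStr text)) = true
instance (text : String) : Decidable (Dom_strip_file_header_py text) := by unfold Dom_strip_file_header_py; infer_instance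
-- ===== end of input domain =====

-- B never splits the text into lines nor joins them back: it peels leading header lines off the stripped string itself (str.partition) and returns the remaining suffix (alternative decomposition, same cost).


-- ===== PORT A =====
-- A's for-loop over lines with state (cleaned, skipping_header)
def pvALoop : List String → List String × Bool → List String × Bool
  | [], st => st
  | line :: rest, (cleaned, skipping) =>
      let stripped := PySem.Str.strip line
      if skipping then
        if PySem.Str.startswith stripped "[CORE FILE" || stripped == "" then
          pvALoop rest (cleaned, skipping)
        else
          pvALoop rest (cleaned ++ [line], false)
      else
        pvALoop rest (cleaned ++ [line], skipping)

-- text.strip().split("\n"): split? is `some` here since the separator "\n" is nonempty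
def strip_file_header_py (text : String) : String :=
  let lines := (PySem.Str.split? (PySem.Str.strip text) "\n").getD []
  PySem.Str.join "\n" (pvALoop lines ([], true)).1

-- ===== PORT B =====
-- hand port (exact) of t.partition("\n") for the one-char separator "\n", over List Char:
-- returns (part before the first '\n', whether a '\n' was found, part after it)
def pvPartNL : List Char → List Char × Bool × List Char
  | [] => ([], false, [])
  | c :: cs =>
      if c = '\n' then ([], true, cs)
      else
        let p := pvPartNL cs
        (c :: p.1, p.2.1, p.2.2)

-- needed by pvPeel's decreasing_by: a found partition decomposes the string
theorem pvPartNL_found : ∀ (t h r : List Char), pvPartNL t = (h, true, r) → t = h ++ '\n' :: r := by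
  intro t
  induction t with
  | nil => intro h r hp; simp [pvPartNL] at hp
  | cons c cs ih =>
      intro h r hp
      by_cases hc : c = '\n'
      · simp [pvPartNL, hc] at hp
        simp [hc, hp.1.symm, hp.2.symm]
      · cases hq : pvPartNL cs with
        | mk h' q =>
          cases q with
          | mk f' r' =>
            simp [pvPartNL, hc, hq] at hp
            obtain ⟨e1, e2, e3⟩ := hp
            have := ih h' r' (by rw [hq, e2])
            simp [← e1, ← e3, this]

-- B's while-loop: tail recursion on the remaining string
def pvPeel (t : List Char) : List Char :=
  match hp : pvPartNL t with
  | (head, found, rest) =>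
      let s := PySem.Chars.strip head
      if s != [] && !(PySem.Chars.startswith s "[CORE FILE".toList) then t
      else if found then pvPeel rest
      else []
termination_by t.length
decreasing_by
  rename_i hfound
  have ht := pvPartNL_found t head rest (by rw [hp, hfound])
  simp [ht]
  omega

def strip_file_header_py_alt (text : String) : String :=
  String.ofList (pvPeel (PySem.Chars.strip text.toList))

-- ===== PRECONDITION & SPEC =====
def Spec_strip_file_header_py (text : String) (out : String) : Prop := out = strip_file_header_py_alt text
instance (text : String) (out : String) : Decidable (Spec_strip_file_header_py text out) := by unfold Spec_strip_file_header_py; infer_instance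

-- ===== CLAIM (what is proved, stated in full; the proofs are below) =====
def Claim_equal_strip_file_header_py : Prop := ∀ (text : String), Dom_strip_file_header_py text → Spec_strip_file_header_py text (strip_file_header_py text)

-- ===== LEMMAS AND PROOFS =====

-- the predicate A's header-skipping branch tests, on Strings and on Char lists
def pvSkip (line : String) : Bool :=
  let stripped := PySem.Str.strip line
  PySem.Str.startswith stripped "[CORE FILE" || stripped == ""

def pvSkipC (cs : List Char) : Bool :=
  let s := PySem.Chars.strip cs
  PySem.Chars.startswith s "[CORE FILE".toList || s == []

theorem pvSkip_ofList (cs : List Char) : pvSkip (String.ofList cs) = pvSkipC cs := by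
  simp only [pvSkip, pvSkipC, PySem.Str.strip, PySem.Str.startswith, String.toList_ofList]
  congr 1
  rw [Bool.eq_iff_iff]
  simp [String.ofList_eq_empty_iff]

theorem pvPartNL_notfound : ∀ (t h r : List Char), pvPartNL t = (h, false, r) → h = t := by
  intro t
  induction t with
  | nil => intro h r hp; simp [pvPartNL] at hp; simp [hp.1.symm]
  | cons c cs ih =>
      intro h r hp
      by_cases hc : c = '\n'
      · simp [pvPartNL, hc] at hp
      · cases hq : pvPartNL cs with
        | mk h' q =>
          cases q with
          | mk f' r' =>
            simp [pvPartNL, hc, hq] at hp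
            obtain ⟨e1, e2, e3⟩ := hp
            have := ih h' r' (by rw [hq, e2])
            simp [← e1, this]

-- characterisation of PySem's fueled splitOn.go on the separator ['\n'] in terms of pvPartNL
theorem pvGo_eq : ∀ (l : List Char) (fuel : Nat) (cur : List Char) (acc : List (List Char)),
    l.length < fuel →
    PySem.Chars.splitOn.go ['\n'] fuel l cur acc =
      acc.reverse ++ (cur.reverse ++ (pvPartNL l).1) ::
        (if (pvPartNL l).2.1 then PySem.Chars.splitOn (pvPartNL l).2.2 ['\n'] else []) := by
  intro l
  induction l with
  | nil =>
      intro fuel cur acc hf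
      match fuel, hf with
      | fuel + 1, _ => simp [PySem.Chars.splitOn.go, pvPartNL]
  | cons c cs ih =>
      intro fuel cur acc hf
      match fuel, hf with
      | fuel + 1, hf =>
        have hlen : cs.length < fuel := by simpa using hf
        by_cases hc : c = '\n'
        · have hpre : List.isPrefixOf ['\n'] (c :: cs) = true := by simp [List.isPrefixOf, hc]
          rw [PySem.Chars.splitOn.go, if_pos hpre]
          have hdrop : List.drop (List.length ['\n']) (c :: cs) = cs := by simp
          rw [hdrop, ih fuel [] (cur.reverse :: acc) hlen]
          have hsplit : PySem.Chars.splitOn cs ['\n'] =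
              (pvPartNL cs).1 ::
                (if (pvPartNL cs).2.1 then PySem.Chars.splitOn (pvPartNL cs).2.2 ['\n'] else []) := by
            rw [PySem.Chars.splitOn, ih (cs.length + 1) [] [] (by omega)]; simp
          simp [pvPartNL, hc, hsplit]
        · have hpre : List.isPrefixOf ['\n'] (c :: cs) = false := by
            simp [List.isPrefixOf]; exact fun h => absurd h.symm hc
          rw [PySem.Chars.splitOn.go, if_neg (by simp [hpre])]
          rw [ih fuel (c :: cur) acc hlen]
          simp [pvPartNL, hc]
  
theorem pvSplitOn_eq (t : List Char) :
    PySem.Chars.splitOn t ['\n'] =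
      (pvPartNL t).1 ::
        (if (pvPartNL t).2.1 then PySem.Chars.splitOn (pvPartNL t).2.2 ['\n'] else []) := by
  rw [PySem.Chars.splitOn, pvGo_eq t (t.length + 1) [] [] (by omega)]; simp

-- joining "\n".split's pieces back with "\n" recovers the string
theorem pvJoinSplit : ∀ (n : Nat) (t : List Char), t.length ≤ n →
    PySem.Chars.join ['\n'] (PySem.Chars.splitOn t ['\n']) = t := by
  intro n
  induction n with
  | zero =>
      intro t ht
      have : t = [] := by cases t <;> simp_all
      subst this
      rw [pvSplitOn_eq]
      simp [pvPartNL, PySem.Chars.join_singleton]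
  | succ n ih =>
      intro t ht
      rw [pvSplitOn_eq]
      cases hfound : (pvPartNL t).2.1 with
      | false =>
          rw [if_neg (by simp)]
          rw [PySem.Chars.join_singleton]
          exact pvPartNL_notfound t _ _ (by rw [← hfound])
      | true =>
          rw [if_pos rfl]
          have ht' := pvPartNL_found t (pvPartNL t).1 (pvPartNL t).2.2 (by rw [← hfound])
          have hlen : (pvPartNL t).2.2.length ≤ n := by
            have := congrArg List.length ht'
            simp at this
            omega
          rw [pvSplitOn_eq ((pvPartNL t).2.2), PySem.Chars.join_cons_cons,
              ← pvSplitOn_eq ((pvPartNL t).2.2), ih _ hlen]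
          simpa using ht'.symm

-- B's peel computes A's drop-the-header-prefix-and-join, on the char level
theorem pvPeelMain : ∀ (n : Nat) (t : List Char), t.length ≤ n →
    pvPeel t = PySem.Chars.join ['\n'] ((PySem.Chars.splitOn t ['\n']).dropWhile pvSkipC) := by
  intro n
  induction n with
  | zero =>
      intro t ht
      have : t = [] := by cases t <;> simp_all
      subst this
      rw [pvPeel, pvSplitOn_eq]
      have h0 : pvSkipC [] = true := by decide
      simp [pvPartNL, h0, PySem.Chars.join_nil]
  | succ n ih =>
      intro t ht
      rw [pvPeel]
      split
      rename_i head found rest hp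
      rw [pvSplitOn_eq, hp]
      dsimp only
      have hkeep : (PySem.Chars.strip head != [] &&
          !(PySem.Chars.startswith (PySem.Chars.strip head) "[CORE FILE".toList)) = !(pvSkipC head) := by
        simp only [pvSkipC, bne, Bool.not_or, Bool.and_comm]
      simp only [hkeep]
      cases hs : pvSkipC head with
      | true =>
          -- header line: both sides drop it
          rw [if_neg (by simp)]
          simp only [List.dropWhile_cons, hs, if_pos]
          cases found with
          | false =>
              simp [PySem.Chars.join_nil]
          | true =>
              have ht' := pvPartNL_found t head rest hp
              have hlen : rest.length ≤ n := by
                have := congrArg List.length ht'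
                simp at this
                omega
              simpa using ih rest hlen
      | false =>
          -- first real line: B returns the suffix t, A keeps every line
          rw [if_pos (by simp)]
          simp only [List.dropWhile_cons, hs]
          simp only [if_neg (by simp : ¬ (false = true))]
          cases found with
          | false =>
              rw [if_neg (by simp)]
              rw [PySem.Chars.join_singleton]
              exact (pvPartNL_notfound t head rest hp).symm
          | true =>
              rw [if_pos rfl]
              have ht' := pvPartNL_found t head rest hp
              have hlen : rest.length ≤ n := by
                have := congrArg List.length ht'
                simp at this
                omega
              rw [pvSplitOn_eq rest, PySem.Chars.join_cons_cons, ← pvSplitOn_eq rest,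
                  pvJoinSplit n rest hlen]
              simpa using ht'

-- A's loop keeps exactly the lines after the skipped prefix
theorem pvALoop_false (lines : List String) (acc : List String) :
    pvALoop lines (acc, false) = (acc ++ lines, false) := by
  induction lines generalizing acc with
  | nil => simp [pvALoop]
  | cons l rest ih => simp [pvALoop, ih]

theorem pvALoop_true (lines : List String) (acc : List String) :
    (pvALoop lines (acc, true)).1 = acc ++ lines.dropWhile pvSkip := by
  induction lines generalizing acc with
  | nil => simp [pvALoop]
  | cons l rest ih =>
      simp only [pvALoop, if_pos trivial]
      cases h : pvSkip l with
      | true =>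
          have hU : (PySem.Str.startswith (PySem.Str.strip l) "[CORE FILE" || PySem.Str.strip l == "") = true := by
            simpa [pvSkip] using h
          rw [if_pos hU, ih]
          simp [h]
      | false =>
          have hU : (PySem.Str.startswith (PySem.Str.strip l) "[CORE FILE" || PySem.Str.strip l == "") = false := by
            simpa [pvSkip] using h
          rw [if_neg (by simp only [hU]; decide), pvALoop_false]
          simp [h]

set_option maxHeartbeats 1000000 in
theorem strip_file_header_py_spec : Claim_equal_strip_file_header_py := by
  intro text _
  unfold Spec_strip_file_header_py strip_file_header_py strip_file_header_py_alt
  have hsep : ("\n" : String).toList = ['\n'] := by decide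
  have hsplit : (PySem.Str.split? (PySem.Str.strip text) "\n").getD [] =
      (PySem.Chars.splitOn (PySem.Chars.strip text.toList) ['\n']).map String.ofList := by
    simp [PySem.Str.split?, PySem.Chars.split?, hsep, PySem.Str.toList_strip]
  rw [hsplit]
  simp only [pvALoop_true, List.nil_append, List.dropWhile_map]
  have hcomp : (pvSkip ∘ String.ofList) = pvSkipC := by
    funext cs; exact pvSkip_ofList cs
  rw [hcomp]
  rw [PySem.Str.join]
  have : List.map String.toList (List.map String.ofList
      ((PySem.Chars.splitOn (PySem.Chars.strip text.toList) ['\n']).dropWhile pvSkipC)) =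
      (PySem.Chars.splitOn (PySem.Chars.strip text.toList) ['\n']).dropWhile pvSkipC := by
    simp [Function.comp_def]
  rw [this, hsep]
  exact congrArg String.ofList
    (pvPeelMain (PySem.Chars.strip text.toList).length _ le_rfl).symm
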